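-- pv_equiv track=rewrite | github.com/yuxin101/skills | skills/darrenluo/coinfound-skill/shared/coinfound_rwa/fetch.py | extract_required_params
-- ===== SOURCE A (Python) =====
-- def extract_required_params(path_template: str) -> list[str]:
--     required: list[str] = []
--     start = 0
--     while True:
--         left = path_template.find("{", start)
--         if left == -1:
--             return required
--         right = path_template.find("}", left)
--         if right == -1:
--             return required
--         required.append(path_template[left + 1 : right])
--         start = right + 1
-- ===== SOURCE B (Python) =====
-- import re
--
-- def extract_required_params(path_template: str) -> list[str]:
--     return re.findall(r'\{([^}]*)\}', path_template)
-- ===== Notes on version B (the rewrite author's own statement) =====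
-- stated objective: idiomatic
-- what changed: Replaces A's manual while-loop of str.find index bookkeeping and slicing with a single regex call re.findall(r'\{([^}]*)\}', path_template), which yields the captured groups directly.
import Mathlib
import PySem

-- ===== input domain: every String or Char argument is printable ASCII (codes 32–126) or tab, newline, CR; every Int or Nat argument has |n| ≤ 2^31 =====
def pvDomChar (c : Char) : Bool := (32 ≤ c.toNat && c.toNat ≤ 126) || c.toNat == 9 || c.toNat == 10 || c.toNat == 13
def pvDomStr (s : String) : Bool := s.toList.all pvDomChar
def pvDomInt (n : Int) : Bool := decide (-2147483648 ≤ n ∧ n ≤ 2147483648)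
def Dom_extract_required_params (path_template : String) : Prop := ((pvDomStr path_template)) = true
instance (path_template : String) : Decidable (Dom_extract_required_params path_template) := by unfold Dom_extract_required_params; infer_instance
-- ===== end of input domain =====

-- B replaces A's manual find/index while-loop by a single regex call (re.findall(r'\{([^}]*)\}', …)); objective: idiomatic.

-- ===== PORT A =====
-- literal transliteration of A's while-loop; the fuel (length+1) only makes the
-- recursion structurally total — the equivalence proof shows it never runs out
def extract_required_params_go (s : List Char) (fuel : Nat) (required : List String) (start : Int) : List String :=
  match fuel with
  | 0 => required
  | f + 1 =>
    let left := PySem.Chars.findFrom s ['{'] start none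
    if left = -1 then required
    else
      let right := PySem.Chars.findFrom s ['}'] left none
      if right = -1 then required
      else
        extract_required_params_go s f
          (required ++ [String.ofList (PySem.List.slice s (some (left + 1)) (some right))])
          (right + 1)

def extract_required_params (path_template : String) : List String :=
  extract_required_params_go path_template.toList (path_template.toList.length + 1) [] 0

-- ===== PORT B =====
-- exact model of re.findall(r'\{([^}]*)\}', s): scan for '{', capture [^}]* up
-- to the next '}' (no match at all once no '}' remains), continue after it
def pyFindallBrace (cs : List Char) : List String :=
  match cs with
  | [] => []
  | c :: rest =>
    if c = '{' then
      match hdw : rest.dropWhile (fun ch => ch ≠ '}') with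
      | [] => []
      | _ :: t => String.ofList (rest.takeWhile (fun ch => ch ≠ '}')) :: pyFindallBrace t
    else pyFindallBrace rest
termination_by cs.length
decreasing_by
  · have hle := List.length_dropWhile_le (fun ch => decide (ch ≠ '}')) rest
    rw [hdw] at hle
    simp at hle ⊢
    omega
  · simp

def extract_required_params_alt (path_template : String) : List String :=
  pyFindallBrace path_template.toList

-- ===== PRECONDITION & SPEC =====
def Spec_extract_required_params (path_template : String) (out : List String) : Prop := out = extract_required_params_alt path_template
instance (path_template : String) (out : List String) : Decidable (Spec_extract_required_params path_template out) := by unfold Spec_extract_required_params; infer_instance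

-- ===== CLAIM (what is proved, stated in full; the proofs are below) =====
def Claim_equal_extract_required_params : Prop := ∀ (path_template : String), Dom_extract_required_params path_template → Spec_extract_required_params path_template (extract_required_params path_template)

-- ===== LEMMAS AND PROOFS =====

-- first-occurrence decomposition of a list around a member
lemma mem_split_first {c : Char} {d : List Char} (h : c ∈ d) :
    ∃ pre tail, d = pre ++ c :: tail ∧ c ∉ pre := by
  induction d with
  | nil => simp at h
  | cons a t ih =>
    by_cases hac : a = c
    · exact ⟨[], t, by simp [hac], by simp⟩
    · have hct : c ∈ t := by
        rcases List.mem_cons.mp h with h1 | h1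
        · exact absurd h1.symm hac
        · exact h1
      obtain ⟨pre, tail, hd, hp⟩ := ih hct
      refine ⟨a :: pre, tail, by simp [hd], ?_⟩
      intro hmem
      rcases List.mem_cons.mp hmem with h1 | h1
      · exact hac h1.symm
      · exact hp h1

lemma find_go_not_mem (c : Char) (d : List Char) (k : Nat) (h : c ∉ d) :
    PySem.Chars.find.go [c] d k = -1 := by
  induction d generalizing k with
  | nil => simp [PySem.Chars.find.go]
  | cons a t ih =>
    have h1 : c ≠ a ∧ c ∉ t := by simpa [not_or] using h
    simp [PySem.Chars.find.go, List.isPrefixOf, ih _ h1.2, h1.1]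

lemma find_go_first (c : Char) (pre tail : List Char) (k : Nat) (h : c ∉ pre) :
    PySem.Chars.find.go [c] (pre ++ c :: tail) k = ((k + pre.length : Nat) : Int) := by
  induction pre generalizing k with
  | nil => simp [PySem.Chars.find.go, List.isPrefixOf]
  | cons a t ih =>
    have h1 : c ≠ a ∧ c ∉ t := by simpa [not_or] using h
    have hrec := ih (k + 1) h1.2
    simp only [List.cons_append]
    simp [PySem.Chars.find.go, List.isPrefixOf, hrec]
    rw [if_neg h1.1]
    omega

lemma span_first (c : Char) (mid tail : List Char) (h : c ∉ mid) :
    (mid ++ c :: tail).takeWhile (fun x => x ≠ c) = mid ∧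
      (mid ++ c :: tail).dropWhile (fun x => x ≠ c) = c :: tail := by
  induction mid with
  | nil =>
    constructor
    · simp
    · simp
  | cons a t ih =>
    have h1 : c ≠ a ∧ c ∉ t := by simpa [not_or] using h
    have ha : a ≠ c := fun hh => h1.1 hh.symm
    obtain ⟨ht, hd⟩ := ih h1.2
    have ht' := ht
    have hd' := hd
    simp only [ne_eq, decide_not] at ht' hd'
    constructor
    · simp [ha, ht']
    · simp [ha, hd']

lemma findall_append_no_brace (pre x : List Char) (h : '{' ∉ pre) :
    pyFindallBrace (pre ++ x) = pyFindallBrace x := by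
  induction pre with
  | nil => simp
  | cons a t ih =>
    have h1 : '{' ≠ a ∧ '{' ∉ t := by simpa [not_or] using h
    have ha : ¬ a = '{' := fun hh => h1.1 hh.symm
    rw [List.cons_append, pyFindallBrace, if_neg ha]
    exact ih h1.2

lemma findall_no_brace (d : List Char) (h : '{' ∉ d) : pyFindallBrace d = [] := by
  have h0 : pyFindallBrace ([] : List Char) = [] := by rw [pyFindallBrace]
  have := findall_append_no_brace d [] h
  rw [List.append_nil] at this
  rw [this, h0]

lemma findall_cons_noclose (rest : List Char)
    (hdw : rest.dropWhile (fun ch => ch ≠ '}') = []) :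
    pyFindallBrace ('{' :: rest) = [] := by
  rw [pyFindallBrace, if_pos rfl]
  split
  · rfl
  · next x t heq => rw [hdw] at heq; exact absurd heq (by simp)

lemma findall_cons_close (rest : List Char) (x : Char) (t : List Char)
    (hdw : rest.dropWhile (fun ch => ch ≠ '}') = x :: t) :
    pyFindallBrace ('{' :: rest) =
      String.ofList (rest.takeWhile (fun ch => ch ≠ '}')) :: pyFindallBrace t := by
  rw [pyFindallBrace, if_pos rfl]
  split
  · next heq => rw [hdw] at heq; exact absurd heq (by simp)
  · next y u heq =>
    rw [hdw] at heq
    obtain ⟨rfl, rfl⟩ : x = y ∧ t = u := by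
      constructor <;> [exact (List.cons.injEq ..).mp heq |>.1; exact (List.cons.injEq ..).mp heq |>.2]
    rfl

lemma goA_eq (s : List Char) : ∀ (fuel k : Nat) (acc : List String),
    k ≤ s.length → s.length - k < fuel →
    extract_required_params_go s fuel acc ((k : Nat) : Int) = acc ++ pyFindallBrace (s.drop k) := by
  intro fuel
  induction fuel with
  | zero => intro k acc hk hf; omega
  | succ f ih =>
    intro k acc hk hf
    by_cases hmem : '{' ∈ s.drop k
    case neg =>
      have hfind : PySem.Chars.find (s.drop k) ['{'] = -1 := by
        simp [PySem.Chars.find, find_go_not_mem _ _ _ hmem]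
      have hleftval : PySem.Chars.findFrom s ['{'] ((k : Nat) : Int) none = -1 := by
        rw [PySem.Chars.findFrom_natCast s ['{'] k hk, hfind]; simp
      simp only [extract_required_params_go, hleftval]
      rw [findall_no_brace _ hmem]
      simp
    case pos =>
      obtain ⟨pre, rest, hd, hpre⟩ := mem_split_first hmem
      have hlend := congrArg List.length hd
      simp [List.length_drop] at hlend
      have hfind : PySem.Chars.find (s.drop k) ['{'] = ((pre.length : Nat) : Int) := by
        rw [hd]
        have := find_go_first '{' pre rest 0 hpre
        simpa [PySem.Chars.find] using this
      have hleftval : PySem.Chars.findFrom s ['{'] ((k : Nat) : Int) none = ((k + pre.length : Nat) : Int) := by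
        rw [PySem.Chars.findFrom_natCast s ['{'] k hk, hfind]
        rw [if_neg (by omega : ¬ ((pre.length : Nat) : Int) = -1)]
        push_cast; ring
      have hkl : k + pre.length + 1 ≤ s.length := by omega
      have hdropkl : s.drop (k + pre.length) = '{' :: rest := by
        have h1 : (s.drop k).drop pre.length = s.drop (k + pre.length) := List.drop_drop ..
        rw [hd, List.drop_left] at h1
        exact h1.symm
      by_cases hmem2 : '}' ∈ rest
      case neg =>
        have hnm : '}' ∉ '{' :: rest := by
          intro hmm
          rcases List.mem_cons.mp hmm with h1 | h1
          · exact absurd h1 (by decide)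
          · exact hmem2 h1
        have hfind2 : PySem.Chars.find (s.drop (k + pre.length)) ['}'] = -1 := by
          rw [hdropkl]
          simp [PySem.Chars.find, find_go_not_mem _ _ _ hnm]
        have hrightval : PySem.Chars.findFrom s ['}'] ((k + pre.length : Nat) : Int) none = -1 := by
          rw [PySem.Chars.findFrom_natCast s ['}'] (k + pre.length) (by omega), hfind2]; simp
        simp only [extract_required_params_go, hleftval]
        rw [if_neg (by omega : ¬ ((k + pre.length : Nat) : Int) = -1), hrightval, if_pos rfl]
        have hdw : rest.dropWhile (fun ch => ch ≠ '}') = [] := by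
          rw [List.dropWhile_eq_nil_iff]
          intro x hx
          simp
          intro hxe
          exact hmem2 (hxe ▸ hx)
        rw [hd, findall_append_no_brace pre _ hpre, findall_cons_noclose rest hdw, List.append_nil]
      case pos =>
        obtain ⟨mid, tail, hrd, hmid⟩ := mem_split_first hmem2
        have hnm : '}' ∉ '{' :: mid := by
          intro hmm
          rcases List.mem_cons.mp hmm with h1 | h1
          · exact absurd h1 (by decide)
          · exact hmid h1
        have hfind2 : PySem.Chars.find (s.drop (k + pre.length)) ['}'] = ((mid.length + 1 : Nat) : Int) := by
          rw [hdropkl, hrd]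
          have := find_go_first '}' ('{' :: mid) tail 0 hnm
          simp only [List.cons_append] at this ⊢
          simpa [PySem.Chars.find] using this
        have hrightval : PySem.Chars.findFrom s ['}'] ((k + pre.length : Nat) : Int) none
            = ((k + pre.length + mid.length + 1 : Nat) : Int) := by
          rw [PySem.Chars.findFrom_natCast s ['}'] (k + pre.length) (by omega), hfind2]
          rw [if_neg (by omega : ¬ ((mid.length + 1 : Nat) : Int) = -1)]
          push_cast; ring
        have hlenrd := congrArg List.length hrd
        simp at hlenrd
        -- the captured slice
        have hdropkl1 : s.drop (k + pre.length + 1) = rest := by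
          have h1 : (s.drop (k + pre.length)).drop 1 = s.drop (k + pre.length + 1) := List.drop_drop ..
          rw [hdropkl] at h1
          simpa using h1.symm
        have hslice : PySem.List.slice s (some (((k + pre.length : Nat) : Int) + 1))
            (some ((k + pre.length + mid.length + 1 : Nat) : Int)) = mid := by
          have e1 : (((k + pre.length : Nat) : Int) + 1) = ((k + pre.length + 1 : Nat) : Int) := by push_cast; ring
          rw [e1, PySem.List.slice_natCast]
          rw [hdropkl1, hrd]
          have e2 : k + pre.length + mid.length + 1 - (k + pre.length + 1) = mid.length := by omega
          rw [e2, List.take_left]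
        -- unfold one step of A's loop
        simp only [extract_required_params_go, hleftval]
        rw [if_neg (by omega : ¬ ((k + pre.length : Nat) : Int) = -1), hrightval,
          if_neg (by omega : ¬ ((k + pre.length + mid.length + 1 : Nat) : Int) = -1), hslice]
        -- recursive call
        have e3 : ((k + pre.length + mid.length + 1 : Nat) : Int) + 1 = ((k + pre.length + mid.length + 2 : Nat) : Int) := by
          push_cast; ring
        rw [e3, ih (k + pre.length + mid.length + 2) _ (by omega) (by omega)]
        have hdroptail : s.drop (k + pre.length + mid.length + 2) = tail := by
          have h1 : (s.drop (k + pre.length + 1)).drop (mid.length + 1) = s.drop (k + pre.length + 1 + (mid.length + 1)) := List.drop_drop ..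
          rw [hdropkl1, hrd] at h1
          have h2 : (mid ++ '}' :: tail).drop (mid.length + 1) = tail := by
            rw [← List.drop_drop, List.drop_left]
            rfl
          rw [h2] at h1
          rw [show k + pre.length + 1 + (mid.length + 1) = k + pre.length + mid.length + 2 by omega] at h1
          exact h1.symm
        rw [hdroptail]
        -- B side
        have hspan := span_first '}' mid tail hmid
        have hdw : rest.dropWhile (fun ch => ch ≠ '}') = '}' :: tail := by rw [hrd]; exact hspan.2
        have htw : rest.takeWhile (fun ch => ch ≠ '}') = mid := by rw [hrd]; exact hspan.1
        rw [hd, findall_append_no_brace pre _ hpre, findall_cons_close rest '}' tail hdw, htw]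
        simp

-- ===== VERDICT (by name: the statement is the Claim_ definition above) =====
theorem extract_required_params_spec : Claim_equal_extract_required_params := by
  intro s _
  unfold Spec_extract_required_params extract_required_params extract_required_params_alt
  have := goA_eq s.toList (s.toList.length + 1) 0 [] (by omega) (by omega)
  simpa using this
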